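-- pv_equiv track=rewrite | github.com/ankurbhambri/DS-Algo | graph/problems/Graph problems/min-edges-removed-excaktly-k-components.py | max_edges_to_remove
-- ===== SOURCE A (Python) =====
-- def max_edges_to_remove(N, M, K, Edges):
--
--     # Impossible to have more components than nodes
--     if K > N:
--         return -1
--
--     adj = {i: [] for i in range(N + 1)}
--
--     for u, v in Edges:
--         adj[u].append(v)
--         adj[v].append(u)
--
--     visit = set()
--
--     def dfs(node):
--         visit.add(node)
--         for child in adj[node]:
--             if child not in visit:
--                 dfs(child)
--
--     c = 0
--     for i in range(N):
--         if i not in visit: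
--             c += 1
--             dfs(i)
--
--     # No edges need to be removed
--     if K <= c:
--         return 0
--
--     if c <= K:
--         return (
--             M - N + K
--         )  # N is the number nodes, M is the number of edges and K is the required number of connected components.
--
--     return -1
-- ===== SOURCE B (Python) =====
-- def max_edges_to_remove(N, M, K, Edges):
--     # Impossible to have more components than nodes
--     if K > N:
--         return -1
--     # component labels: merge by relabeling instead of DFS
--     comp = list(range(N + 1))
--     for u, v in Edges:
--         ru, rv = comp[u], comp[v]
--         if ru != rv:
--             comp = [ru if x == rv else x for x in comp]
--     c = len({comp[i] for i in range(N)})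
--     if K <= c:
--         return 0
--     if c <= K:
--         return M - N + K
--     return -1
-- ===== Notes on version B (the rewrite author's own statement) =====
-- stated objective: alternative
-- what changed: Replaces the adjacency-dict + recursive DFS component count with an edge-driven union-by-relabeling scheme: a label array over 0..N is folded over the edges, merging labels, and c is the number of distinct labels among nodes 0..N-1.
import Mathlib
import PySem

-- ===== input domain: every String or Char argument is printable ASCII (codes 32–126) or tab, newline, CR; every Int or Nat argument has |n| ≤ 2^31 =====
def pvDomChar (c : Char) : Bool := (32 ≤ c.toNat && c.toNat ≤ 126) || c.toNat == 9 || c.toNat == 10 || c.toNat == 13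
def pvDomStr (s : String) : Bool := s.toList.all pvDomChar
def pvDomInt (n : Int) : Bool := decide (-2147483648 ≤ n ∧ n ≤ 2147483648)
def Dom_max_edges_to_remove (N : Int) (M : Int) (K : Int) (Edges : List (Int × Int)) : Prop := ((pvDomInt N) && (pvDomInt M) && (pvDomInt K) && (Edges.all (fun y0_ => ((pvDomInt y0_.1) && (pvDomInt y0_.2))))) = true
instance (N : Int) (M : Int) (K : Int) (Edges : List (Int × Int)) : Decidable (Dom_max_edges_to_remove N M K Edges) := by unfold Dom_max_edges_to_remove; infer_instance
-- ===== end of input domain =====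

-- B replaces A's adjacency-dict + recursive DFS by an edge-driven union-by-relabeling
-- component count (a genuinely different algorithm; equal return values on Pre_).

-- ===== PORT A =====
-- adj = {i: [] for i in range(N + 1)}
def pvAdjInit (N : Int) : PySem.Dict Int (List Int) :=
  (PySem.List.pyRange 0 (N + 1) 1).foldl (fun d i => d.insert i ([] : List Int)) PySem.Dict.empty

-- for u, v in Edges: adj[u].append(v); adj[v].append(u)
def pvAdjBuild (N : Int) (Edges : List (Int × Int)) : PySem.Dict Int (List Int) :=
  Edges.foldl
    (fun d uv => (d.modify uv.1 [] (fun l => l ++ [uv.2])).modify uv.2 [] (fun l => l ++ [uv.1]))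
    (pvAdjInit N)

-- termination measure: number of nodes of range(N+1) not yet visited
def pvMissing (N : Int) (vs : PySem.Set Int) : Nat :=
  (List.range (N + 1).toNat).countP (fun (k : Nat) => decide (¬ ((k : Int) ∈ vs)))

theorem pvCountP_lt {α : Type} (p q : α → Bool) (l : List α)
    (h : ∀ a ∈ l, p a = true → q a = true) (a0 : α) (ha0 : a0 ∈ l)
    (hq : q a0 = true) (hp : ¬ p a0 = true) : l.countP p < l.countP q := by
  induction l with
  | nil => cases ha0
  | cons b t ih =>
    simp only [List.countP_cons]
    have hmono : t.countP p ≤ t.countP q :=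
      List.countP_mono_left (fun a ha => h a (List.mem_cons_of_mem _ ha))
    rcases List.mem_cons.1 ha0 with heq | hmem
    · subst heq
      rw [hq, if_neg hp]
      simp; omega
    · have hlt := ih (fun a ha => h a (List.mem_cons_of_mem _ ha)) hmem
      have hbt : (if p b = true then 1 else 0) ≤ (if q b = true then 1 else 0) := by
        by_cases hb : p b = true
        · simp [hb, h b List.mem_cons_self hb]
        · rw [if_neg hb]; split <;> omega
      omega

theorem pvMissing_mono (N : Int) (vs vs' : PySem.Set Int) (h : ∀ x ∈ vs, x ∈ vs') :
    pvMissing N vs' ≤ pvMissing N vs := by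
  unfold pvMissing
  exact List.countP_mono_left (fun a _ => by
    simp only [decide_eq_true_eq]
    exact fun hn hmem => hn (h _ hmem))

theorem pvMissing_add_lt (N : Int) (vs : PySem.Set Int) (c : Int)
    (h0 : 0 ≤ c) (h1 : c < N + 1) (hc : c ∉ vs) :
    pvMissing N (PySem.Set.add vs c) < pvMissing N vs := by
  unfold pvMissing
  refine pvCountP_lt _ _ _ ?hpt c.toNat ?ha ?hq ?hp
  case hpt =>
    intro a _ ha
    simp only [decide_eq_true_eq] at ha ⊢
    intro hmem
    exact ha ((PySem.Set.mem_add _ _ _).2 (Or.inl hmem))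
  case ha => rw [List.mem_range]; omega
  case hq =>
    simp only [decide_eq_true_eq]
    rwa [Int.toNat_of_nonneg h0]
  case hp =>
    simp only [decide_eq_true_eq, not_not]
    rw [Int.toNat_of_nonneg h0]
    exact (PySem.Set.mem_add _ _ _).2 (Or.inr rfl)

-- def dfs(node): visit.add(node); for child in adj[node]: if child not in visit: dfs(child)
-- ported over the child list, with the recursive dfs-body inlined at the call site;
-- the range test 0 ≤ c < N+1 is a totality guard only (children always satisfy it under Pre_),
-- and the subtype carries monotonicity of the visited set for termination.
def pvDfsList (adj : PySem.Dict Int (List Int)) (N : Int) (vs : PySem.Set Int) (l : List Int) :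
    {s : PySem.Set Int // ∀ x ∈ vs, x ∈ s} :=
  match l with
  | [] => ⟨vs, fun _ h => h⟩
  | c :: cs =>
    if hc : c ∈ vs then
      pvDfsList adj N vs cs
    else
      if hg : 0 ≤ c ∧ c < N + 1 then
        let r := pvDfsList adj N (PySem.Set.add vs c) (adj.getD c [])
        let r2 := pvDfsList adj N r.1 cs
        ⟨r2.1, fun x hx => r2.2 x (r.2 x ((PySem.Set.mem_add _ _ _).2 (Or.inl hx)))⟩
      else
        pvDfsList adj N vs cs
termination_by (pvMissing N vs, l.length)
decreasing_by
  · exact Prod.Lex.right _ (Nat.lt_succ_self _)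
  · exact Prod.Lex.left _ _ (pvMissing_add_lt N vs c hg.1 hg.2 hc)
  · rcases Nat.lt_or_ge (pvMissing N r.1) (pvMissing N vs) with h | h
    · exact Prod.Lex.left _ _ h
    · have hle : pvMissing N r.1 ≤ pvMissing N vs :=
        pvMissing_mono N vs r.1 (fun x hx => r.2 x ((PySem.Set.mem_add _ _ _).2 (Or.inl hx)))
      have : pvMissing N r.1 = pvMissing N vs := le_antisymm hle h
      rw [this]
      exact Prod.Lex.right _ (Nat.lt_succ_self _)
  · exact Prod.Lex.right _ (Nat.lt_succ_self _)

-- dfs(i) at a seed (visit.add(i) then the child loop)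
def pvDfsFrom (adj : PySem.Dict Int (List Int)) (N : Int) (vs : PySem.Set Int) (node : Int) :
    PySem.Set Int :=
  if 0 ≤ node ∧ node < N + 1 then (pvDfsList adj N (PySem.Set.add vs node) (adj.getD node [])).1
  else vs

def max_edges_to_remove (N : Int) (M : Int) (K : Int) (Edges : List (Int × Int)) : Int :=
  if K > N then -1
  else
    let adj := pvAdjBuild N Edges
    -- c = 0; for i in range(N): if i not in visit: c += 1; dfs(i)
    let st := (PySem.List.pyRange 0 N 1).foldl
      (fun (p : Int × PySem.Set Int) i => if i ∈ p.2 then p else (p.1 + 1, pvDfsFrom adj N p.2 i))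
      ((0 : Int), PySem.Set.empty)
    if K ≤ st.1 then 0
    else if st.1 ≤ K then M - N + K
    else -1

-- ===== PORT B =====
def max_edges_to_remove_alt (N : Int) (M : Int) (K : Int) (Edges : List (Int × Int)) : Int :=
  if K > N then -1
  else
    let comp := Edges.foldl
      (fun comp uv =>
        let ru := PySem.List.pyGetD comp uv.1 0
        let rv := PySem.List.pyGetD comp uv.2 0
        if ru ≠ rv then comp.map (fun x => if x = rv then ru else x) else comp)
      (PySem.List.pyRange 0 (N + 1) 1)
    let c : Int := PySem.Set.len
      (PySem.Set.ofList ((PySem.List.pyRange 0 N 1).map (fun i => PySem.List.pyGetD comp i 0)))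
    if K ≤ c then 0
    else if c ≤ K then M - N + K
    else -1

-- ===== PRECONDITION & SPEC =====
-- Pre_ excludes exactly the inputs where A raises: K ≤ N with some edge endpoint outside
-- the dict keys 0..N (KeyError in adj[u] / adj[v]).
def Pre_max_edges_to_remove (N : Int) (M : Int) (K : Int) (Edges : List (Int × Int)) : Prop :=
  K > N ∨ ∀ p ∈ Edges, 0 ≤ p.1 ∧ p.1 ≤ N ∧ 0 ≤ p.2 ∧ p.2 ≤ N
instance (N : Int) (M : Int) (K : Int) (Edges : List (Int × Int)) : Decidable (Pre_max_edges_to_remove N M K Edges) := by unfold Pre_max_edges_to_remove; infer_instance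

def pvWitness_max_edges_to_remove : Int × Int × Int × (List (Int × Int)) := (3, 2, 2, [(0, 1), (1, 2)])

def Spec_max_edges_to_remove (N : Int) (M : Int) (K : Int) (Edges : List (Int × Int)) (out : Int) : Prop := out = max_edges_to_remove_alt N M K Edges
instance (N : Int) (M : Int) (K : Int) (Edges : List (Int × Int)) (out : Int) : Decidable (Spec_max_edges_to_remove N M K Edges out) := by unfold Spec_max_edges_to_remove; infer_instance

-- ===== CLAIM (what is proved, stated in full; the proofs are below) =====
def Claim_equal_max_edges_to_remove : Prop := ∀ (N : Int) (M : Int) (K : Int) (Edges : List (Int × Int)), Dom_max_edges_to_remove N M K Edges → Pre_max_edges_to_remove N M K Edges → Spec_max_edges_to_remove N M K Edges (max_edges_to_remove N M K Edges)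

-- ===== LEMMAS AND PROOFS =====

-- connectivity relation generated by the edge list (proof-only)
def pvEdgeRel (E : List (Int × Int)) (a b : Int) : Prop := (a, b) ∈ E ∨ (b, a) ∈ E
def pvConn (E : List (Int × Int)) : Int → Int → Prop := Relation.ReflTransGen (pvEdgeRel E)
-- B's component label of x (proof-only shorthand) and B's fold step
def pvG (comp : List Int) (x : Int) : Int := PySem.List.pyGetD comp x 0
def pvStepB (comp : List Int) (uv : Int × Int) : List Int :=
  let ru := PySem.List.pyGetD comp uv.1 0
  let rv := PySem.List.pyGetD comp uv.2 0
  if ru ≠ rv then comp.map (fun x => if x = rv then ru else x) else comp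

theorem pvConn_symm (E : List (Int × Int)) {x y : Int} (h : pvConn E x y) : pvConn E y x := by
  refine Relation.ReflTransGen.symmetric ?_ h
  intro a b hab
  unfold pvEdgeRel at *; tauto

theorem pvConn_nil (x y : Int) : pvConn [] x y ↔ x = y := by
  constructor
  · intro h
    induction h with
    | refl => rfl
    | tail _ hstep _ => cases hstep <;> simp_all
  · rintro rfl; exact Relation.ReflTransGen.refl

theorem pvEdgeRel_bound {E : List (Int × Int)} {N : Int}
    (hE : ∀ p ∈ E, 0 ≤ p.1 ∧ p.1 ≤ N ∧ 0 ≤ p.2 ∧ p.2 ≤ N) {a b : Int}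
    (h : pvEdgeRel E a b) : 0 ≤ b ∧ b ≤ N := by
  rcases h with h | h
  · exact ⟨(hE _ h).2.2.1, (hE _ h).2.2.2⟩
  · exact ⟨(hE _ h).1, (hE _ h).2.1⟩

-- adjacency dict characterization
theorem pvAdjInit_getD (N x : Int) : (pvAdjInit N).getD x [] = [] := by
  suffices h : ∀ (l : List Int) (d : PySem.Dict Int (List Int)), (∀ z, d.getD z [] = []) →
      ∀ z, (l.foldl (fun d i => d.insert i ([] : List Int)) d).getD z [] = [] by
    exact h _ _ (fun z => by simp [PySem.Dict.getD_empty]) x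
  intro l
  induction l with
  | nil => exact fun d h => h
  | cons a t ih =>
    intro d h z
    refine ih _ (fun w => ?_) z
    rw [PySem.Dict.getD_insert]
    split <;> simp [h]

theorem pvAdjStep_mem (d : PySem.Dict Int (List Int)) (u v x y : Int) :
    y ∈ ((d.modify u ([] : List Int) (fun l => l ++ [v])).modify v [] (fun l => l ++ [u])).getD x []
      ↔ y ∈ d.getD x [] ∨ (x = u ∧ y = v) ∨ (x = v ∧ y = u) := by
  simp only [PySem.Dict.getD_modify]
  by_cases h1 : x = v <;> by_cases h2 : x = u <;>
    simp only [h1, h2, if_pos] <;> simp_all [List.mem_append]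

theorem pvAdjBuild_mem (N : Int) (Edges : List (Int × Int)) (x y : Int) :
    y ∈ (pvAdjBuild N Edges).getD x [] ↔ pvEdgeRel Edges x y := by
  suffices h : ∀ (es P : List (Int × Int)) (d : PySem.Dict Int (List Int)),
      (∀ x y, y ∈ d.getD x [] ↔ pvEdgeRel P x y) →
      ∀ x y, y ∈ (es.foldl (fun d uv =>
          (d.modify uv.1 [] (fun l => l ++ [uv.2])).modify uv.2 [] (fun l => l ++ [uv.1])) d).getD x []
        ↔ pvEdgeRel (P ++ es) x y by
    have := h Edges [] (pvAdjInit N)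
      (fun x y => by simp [pvAdjInit_getD, pvEdgeRel]) x y
    simpa using this
  intro es
  induction es with
  | nil => intro P d h x y; simpa using h x y
  | cons e t ih =>
    intro P d h x y
    simp only [List.foldl_cons]
    have := ih (P ++ [e])
      ((d.modify e.1 [] (fun l => l ++ [e.2])).modify e.2 [] (fun l => l ++ [e.1]))
      (fun x y => by
      rw [pvAdjStep_mem, h]
      unfold pvEdgeRel
      simp [List.mem_append, Prod.ext_iff]
      tauto) x y
    simpa [List.append_assoc] using this

-- unfolding lemmas for the DFS
theorem pvL_nil (adj : PySem.Dict Int (List Int)) (N : Int) (vs : PySem.Set Int) :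
    (pvDfsList adj N vs []).1 = vs := by rw [pvDfsList]

theorem pvL_cons_mem (adj : PySem.Dict Int (List Int)) (N : Int) (vs : PySem.Set Int)
    {c : Int} (cs : List Int) (hc : c ∈ vs) :
    (pvDfsList adj N vs (c :: cs)).1 = (pvDfsList adj N vs cs).1 := by
  rw [pvDfsList]; simp [hc]

theorem pvL_cons_new (adj : PySem.Dict Int (List Int)) (N : Int) (vs : PySem.Set Int)
    {c : Int} (cs : List Int) (hc : c ∉ vs) (hg : 0 ≤ c ∧ c < N + 1) :
    (pvDfsList adj N vs (c :: cs)).1 =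
      (pvDfsList adj N (pvDfsList adj N (PySem.Set.add vs c) (adj.getD c [])).1 cs).1 := by
  rw [pvDfsList]; simp [hc, hg]

theorem pvL_cons_out (adj : PySem.Dict Int (List Int)) (N : Int) (vs : PySem.Set Int)
    {c : Int} (cs : List Int) (hc : c ∉ vs) (hg : ¬(0 ≤ c ∧ c < N + 1)) :
    (pvDfsList adj N vs (c :: cs)).1 = (pvDfsList adj N vs cs).1 := by
  rw [pvDfsList]; simp [hc]; rw [if_neg (by omega)]

-- every in-range member of the processed list ends up visited
theorem pvDfs_mem_seed (adj : PySem.Dict Int (List Int)) (N : Int) :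
    ∀ (l : List Int) (vs : PySem.Set Int), ∀ c ∈ l, 0 ≤ c → c < N + 1 →
      c ∈ (pvDfsList adj N vs l).1 := by
  intro l
  induction l with
  | nil => intro vs c hc; cases hc
  | cons a t ih =>
    intro vs c hcl h0 h1
    by_cases ha : a ∈ vs
    · rw [pvL_cons_mem adj N vs t ha]
      rcases List.mem_cons.1 hcl with rfl | hct
      · exact (pvDfsList adj N vs t).2 _ ha
      · exact ih vs c hct h0 h1
    · rcases List.mem_cons.1 hcl with rfl | hct
      · rw [pvL_cons_new adj N vs t ha ⟨h0, h1⟩]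
        have hin : c ∈ (pvDfsList adj N (PySem.Set.add vs c) (adj.getD c [])).1 :=
          (pvDfsList adj N _ _).2 _ ((PySem.Set.mem_add _ _ _).2 (Or.inr rfl))
        exact (pvDfsList adj N _ t).2 _ hin
      · by_cases hg : 0 ≤ a ∧ a < N + 1
        · rw [pvL_cons_new adj N vs t ha hg]; exact ih _ c hct h0 h1
        · rw [pvL_cons_out adj N vs t ha hg]; exact ih _ c hct h0 h1

-- everything visited was already visited or is connected to some list member
theorem pvDfs_subset (adj : PySem.Dict Int (List Int)) (N : Int) (Edges : List (Int × Int))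
    (hadj : ∀ x y, y ∈ adj.getD x [] ↔ pvEdgeRel Edges x y) :
    ∀ (vs : PySem.Set Int) (l : List Int), ∀ x ∈ (pvDfsList adj N vs l).1,
      x ∈ vs ∨ ∃ c ∈ l, pvConn Edges c x := by
  intro vs l
  induction vs, l using pvDfsList.induct adj N with
  | case1 vs => intro x hx; rw [pvL_nil] at hx; exact Or.inl hx
  | case2 vs c cs hc ih =>
    intro x hx
    rw [pvL_cons_mem adj N vs cs hc] at hx
    rcases ih x hx with h | ⟨c', hc', hconn⟩
    · exact Or.inl h
    · exact Or.inr ⟨c', List.mem_cons_of_mem _ hc', hconn⟩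
  | case3 vs c cs hc hg r ih1 ih2 ih3 =>
    intro x hx
    rw [pvL_cons_new adj N vs cs hc hg] at hx
    rcases ih3 x hx with hxr | ⟨c', hc', hconn⟩
    · rcases ih1 x hxr with hvs | ⟨b, hb, hconn⟩
      · rcases (PySem.Set.mem_add _ _ _).1 hvs with h | rfl
        · exact Or.inl h
        · exact Or.inr ⟨x, List.mem_cons_self, Relation.ReflTransGen.refl⟩
      · exact Or.inr ⟨c, List.mem_cons_self,
          Relation.ReflTransGen.head ((hadj c b).1 hb) hconn⟩
    · exact Or.inr ⟨c', List.mem_cons_of_mem _ hc', hconn⟩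
  | case4 vs c cs hc hg ih =>
    intro x hx
    rw [pvL_cons_out adj N vs cs hc hg] at hx
    rcases ih x hx with h | ⟨c', hc', hconn⟩
    · exact Or.inl h
    · exact Or.inr ⟨c', List.mem_cons_of_mem _ hc', hconn⟩

-- the result is adjacency-closed at freshly visited nodes
theorem pvDfs_closed (adj : PySem.Dict Int (List Int)) (N : Int)
    (hAdjB : ∀ x y, y ∈ adj.getD x [] → 0 ≤ y ∧ y < N + 1) :
    ∀ (vs : PySem.Set Int) (l : List Int), ∀ x ∈ (pvDfsList adj N vs l).1,
      x ∈ vs ∨ ∀ y ∈ adj.getD x [], y ∈ (pvDfsList adj N vs l).1 := by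
  intro vs l
  induction vs, l using pvDfsList.induct adj N with
  | case1 vs => intro x hx; rw [pvL_nil] at hx; exact Or.inl hx
  | case2 vs c cs hc ih =>
    intro x hx
    rw [pvL_cons_mem adj N vs cs hc] at hx ⊢
    exact ih x hx
  | case3 vs c cs hc hg r ih1 ih2 ih3 =>
    intro x hx
    rw [pvL_cons_new adj N vs cs hc hg] at hx ⊢
    rcases ih3 x hx with hxr | hcl2
    · rcases ih1 x hxr with hvsadd | hcl1
      · rcases (PySem.Set.mem_add _ _ _).1 hvsadd with hv | rfl
        · exact Or.inl hv
        · refine Or.inr (fun y hy => ?_)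
          have hb := hAdjB x y hy
          have hyr : y ∈ (pvDfsList adj N (PySem.Set.add vs x) (adj.getD x [])).1 :=
            pvDfs_mem_seed adj N (adj.getD x []) (PySem.Set.add vs x) y hy hb.1 hb.2
          exact (pvDfsList adj N _ cs).2 _ hyr
      · exact Or.inr (fun y hy => (pvDfsList adj N _ cs).2 _ (hcl1 y hy))
    · exact Or.inr hcl2
  | case4 vs c cs hc hg ih =>
    intro x hx
    rw [pvL_cons_out adj N vs cs hc hg] at hx ⊢
    exact ih x hx

-- dfs from a seed visits exactly the old set plus the seed's component
theorem pvDfsFrom_mem (adj : PySem.Dict Int (List Int)) (N : Int) (Edges : List (Int × Int))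
    (hadj : ∀ x y, y ∈ adj.getD x [] ↔ pvEdgeRel Edges x y)
    (hAdjB : ∀ x y, y ∈ adj.getD x [] → 0 ≤ y ∧ y < N + 1)
    (vs : PySem.Set Int) (hclosed : ∀ x ∈ vs, ∀ y, pvEdgeRel Edges x y → y ∈ vs)
    (i : Int) (hi : 0 ≤ i) (hi' : i < N + 1) :
    ∀ x, x ∈ pvDfsFrom adj N vs i ↔ x ∈ vs ∨ pvConn Edges i x := by
  intro x
  unfold pvDfsFrom
  rw [if_pos ⟨hi, hi'⟩]
  constructor
  · intro hx
    rcases pvDfs_subset adj N Edges hadj _ _ x hx with hv | ⟨b, hb, hconn⟩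
    · rcases (PySem.Set.mem_add _ _ _).1 hv with h | rfl
      · exact Or.inl h
      · exact Or.inr Relation.ReflTransGen.refl
    · exact Or.inr (Relation.ReflTransGen.head ((hadj i b).1 hb) hconn)
  · rintro (hv | hconn)
    · exact (pvDfsList adj N _ _).2 _ ((PySem.Set.mem_add _ _ _).2 (Or.inl hv))
    · induction hconn with
      | refl => exact (pvDfsList adj N _ _).2 _ ((PySem.Set.mem_add _ _ _).2 (Or.inr rfl))
      | @tail z w h1 h2 ihz =>
        rcases pvDfs_closed adj N hAdjB (PySem.Set.add vs i) (adj.getD i []) z ihz with hz | hcl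
        · rcases (PySem.Set.mem_add _ _ _).1 hz with hzv | rfl
          · exact (pvDfsList adj N _ _).2 _
              ((PySem.Set.mem_add _ _ _).2 (Or.inl (hclosed z hzv w h2)))
          · have hy : w ∈ adj.getD z [] := (hadj z w).2 h2
            have hb := hAdjB z w hy
            exact pvDfs_mem_seed adj N _ _ w hy hb.1 hb.2
        · exact hcl w ((hadj z w).2 h2)

-- one edge appended to the underlying edge list
theorem pvConn_snoc (P : List (Int × Int)) (u v x y : Int) :
    pvConn (P ++ [(u, v)]) x y ↔
      pvConn P x y ∨ (pvConn P x u ∧ pvConn P v y) ∨ (pvConn P x v ∧ pvConn P u y) := by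
  constructor
  · intro h
    induction h with
    | refl => exact Or.inl Relation.ReflTransGen.refl
    | @tail z w h1 hstep ih =>
      have hstep' : pvEdgeRel P z w ∨ (z = u ∧ w = v) ∨ (z = v ∧ w = u) := by
        unfold pvEdgeRel at hstep ⊢
        simp only [List.mem_append, List.mem_singleton, Prod.mk.injEq] at hstep
        tauto
      rcases ih with hxy | ⟨h1', h2'⟩ | ⟨h1', h2'⟩ <;>
        rcases hstep' with hzw | ⟨rfl, rfl⟩ | ⟨rfl, rfl⟩
      · exact Or.inl (hxy.tail hzw)
      · exact Or.inr (Or.inl ⟨hxy, Relation.ReflTransGen.refl⟩)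
      · exact Or.inr (Or.inr ⟨hxy, Relation.ReflTransGen.refl⟩)
      · exact Or.inr (Or.inl ⟨h1', h2'.tail hzw⟩)
      · exact Or.inr (Or.inl ⟨h1', Relation.ReflTransGen.refl⟩)
      · exact Or.inl h1'
      · exact Or.inr (Or.inr ⟨h1', h2'.tail hzw⟩)
      · exact Or.inl h1'
      · exact Or.inr (Or.inr ⟨h1', Relation.ReflTransGen.refl⟩)
  · have hmono : ∀ a b, pvConn P a b → pvConn (P ++ [(u, v)]) a b := fun a b =>
      Relation.ReflTransGen.mono (fun a b hab => by
        unfold pvEdgeRel at hab ⊢; simp only [List.mem_append]; tauto)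
    have huv : pvConn (P ++ [(u, v)]) u v :=
      Relation.ReflTransGen.single (Or.inl (by simp))
    have hvu : pvConn (P ++ [(u, v)]) v u :=
      Relation.ReflTransGen.single (Or.inr (by simp))
    rintro (h | ⟨h1, h2⟩ | ⟨h1, h2⟩)
    · exact hmono _ _ h
    · exact ((hmono _ _ h1).trans huv).trans (hmono _ _ h2)
    · exact ((hmono _ _ h1).trans hvu).trans (hmono _ _ h2)

theorem pvG_map (comp : List Int) (f : Int → Int) {x : Int} (hx : 0 ≤ x)
    (hlt : x < (comp.length : Int)) : pvG (comp.map f) x = f (pvG comp x) := by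
  unfold pvG
  rw [PySem.List.pyGetD_of_nonneg _ _ hx, PySem.List.pyGetD_of_nonneg _ _ hx]
  have hlt' : x.toNat < comp.length := by omega
  rw [List.getD_eq_getElem _ _ (by simpa using hlt'), List.getD_eq_getElem _ _ hlt']
  simp

-- B's fold invariant: labels decide connectivity over the processed prefix
theorem pvCompInv (N : Int) :
    ∀ (es P : List (Int × Int)) (comp : List Int),
      (∀ p ∈ es, 0 ≤ p.1 ∧ p.1 ≤ N ∧ 0 ≤ p.2 ∧ p.2 ≤ N) →
      ((comp.length : Int) = N + 1) →
      (∀ x, 0 ≤ x → x < N + 1 → pvConn P x (pvG comp x)) →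
      (∀ x y, 0 ≤ x → x < N + 1 → 0 ≤ y → y < N + 1 →
        (pvG comp x = pvG comp y ↔ pvConn P x y)) →
      (((es.foldl pvStepB comp).length : Int) = N + 1) ∧
      (∀ x, 0 ≤ x → x < N + 1 → pvConn (P ++ es) x (pvG (es.foldl pvStepB comp) x)) ∧
      (∀ x y, 0 ≤ x → x < N + 1 → 0 ≤ y → y < N + 1 →
        (pvG (es.foldl pvStepB comp) x = pvG (es.foldl pvStepB comp) y ↔ pvConn (P ++ es) x y)) := by
  intro es
  induction es with
  | nil =>
    intro P comp _ hlen hrep hiff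
    exact ⟨by simpa using hlen, by simpa using hrep, by simpa using hiff⟩
  | cons e t ih =>
    intro P comp hb hlen hrep hiff
    obtain ⟨u, v⟩ := e
    obtain ⟨hu0, hu1, hv0, hv1⟩ := hb (u, v) List.mem_cons_self
    have hu2 : u < N + 1 := by omega
    have hv2 : v < N + 1 := by omega
    -- one step
    have hstep :
        ((pvStepB comp (u, v)).length : Int) = N + 1 ∧
        (∀ x, 0 ≤ x → x < N + 1 → pvConn (P ++ [(u, v)]) x (pvG (pvStepB comp (u, v)) x)) ∧
        (∀ x y, 0 ≤ x → x < N + 1 → 0 ≤ y → y < N + 1 →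
          (pvG (pvStepB comp (u, v)) x = pvG (pvStepB comp (u, v)) y ↔ pvConn (P ++ [(u, v)]) x y)) := by
      by_cases hru : pvG comp u = pvG comp v
      · -- labels already equal: no relabeling, connectivity unchanged
        have hcomp' : pvStepB comp (u, v) = comp := by
          unfold pvStepB pvG at *
          simp [hru]
        have huv : pvConn P u v := (hiff u v hu0 hu2 hv0 hv2).1 hru
        have hconn_eq : ∀ x y, pvConn (P ++ [(u, v)]) x y ↔ pvConn P x y := by
          intro x y
          rw [pvConn_snoc]
          constructor
          · rintro (h | ⟨h1, h2⟩ | ⟨h1, h2⟩)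
            · exact h
            · exact (h1.trans huv).trans h2
            · exact (h1.trans (pvConn_symm P huv)).trans h2
          · exact Or.inl
        refine ⟨by rw [hcomp']; exact hlen, ?_, ?_⟩
        · intro x hx hx'
          rw [hcomp', hconn_eq]
          exact hrep x hx hx'
        · intro x y hx hx' hy hy'
          rw [hcomp', hconn_eq]
          exact hiff x y hx hx' hy hy'
      · -- merge the two label classes
        have hcomp' : pvStepB comp (u, v) =
            comp.map (fun t => if t = pvG comp v then pvG comp u else t) := by
          unfold pvStepB pvG at *
          simp [hru]
        have hg' : ∀ x, 0 ≤ x → x < N + 1 →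
            pvG (pvStepB comp (u, v)) x =
              (if pvG comp x = pvG comp v then pvG comp u else pvG comp x) := by
          intro x hx hx'
          rw [hcomp', pvG_map comp _ hx (by omega)]
        refine ⟨by rw [hcomp']; simpa using hlen, ?_, ?_⟩
        · -- representative invariant
          intro x hx hx'
          rw [hg' x hx hx', pvConn_snoc]
          by_cases h1 : pvG comp x = pvG comp v
          · rw [if_pos h1]
            exact Or.inr (Or.inr ⟨(hiff x v hx hx' hv0 hv2).1 h1, hrep u hu0 hu2⟩)
          · rw [if_neg h1]
            exact Or.inl (hrep x hx hx')
        · intro x y hx hx' hy hy'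
          rw [hg' x hx hx', hg' y hy hy', pvConn_snoc]
          have hxv : pvG comp x = pvG comp v ↔ pvConn P x v := hiff x v hx hx' hv0 hv2
          have hyv : pvG comp y = pvG comp v ↔ pvConn P y v := hiff y v hy hy' hv0 hv2
          by_cases h1 : pvG comp x = pvG comp v <;> by_cases h2 : pvG comp y = pvG comp v
          · rw [if_pos h1, if_pos h2]
            constructor
            · intro _
              exact Or.inl ((hxv.1 h1).trans (pvConn_symm P (hyv.1 h2)))
            · intro _; rfl
          · rw [if_pos h1, if_neg h2]
            constructor
            · intro he
              exact Or.inr (Or.inr ⟨hxv.1 h1, (hiff u y hu0 hu2 hy hy').1 he⟩)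
            · rintro (h | ⟨ha, hb2⟩ | ⟨ha, hb2⟩)
              · exact absurd (hyv.2 ((pvConn_symm P h).trans (hxv.1 h1))) h2
              · exact absurd (hyv.2 (pvConn_symm P hb2)) h2
              · exact (hiff u y hu0 hu2 hy hy').2 hb2
          · rw [if_neg h1, if_pos h2]
            constructor
            · intro he
              exact Or.inr (Or.inl ⟨(hiff x u hx hx' hu0 hu2).1 he, pvConn_symm P (hyv.1 h2)⟩)
            · rintro (h | ⟨ha, hb2⟩ | ⟨ha, hb2⟩)
              · exact absurd (hxv.2 (h.trans (hyv.1 h2))) h1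
              · exact (hiff x u hx hx' hu0 hu2).2 ha
              · exact absurd (hxv.2 ha) h1
          · rw [if_neg h1, if_neg h2]
            constructor
            · intro he
              exact Or.inl ((hiff x y hx hx' hy hy').1 he)
            · rintro (h | ⟨ha, hb2⟩ | ⟨ha, hb2⟩)
              · exact (hiff x y hx hx' hy hy').2 h
              · exact absurd (hyv.2 (pvConn_symm P hb2)) h2
              · exact absurd (hxv.2 ha) h1
    -- fold the tail via the induction hypothesis
    obtain ⟨hl', hr', hi'⟩ := hstep
    have := ih (P ++ [(u, v)]) (pvStepB comp (u, v))
      (fun p hp => hb p (List.mem_cons_of_mem _ hp)) hl' hr' hi'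
    simpa [List.append_assoc] using this

theorem pvCompFinal (N : Int) (Edges : List (Int × Int)) (hN : 0 ≤ N)
    (hE : ∀ p ∈ Edges, 0 ≤ p.1 ∧ p.1 ≤ N ∧ 0 ≤ p.2 ∧ p.2 ≤ N) :
    ∀ x y, 0 ≤ x → x < N + 1 → 0 ≤ y → y < N + 1 →
      (pvG (Edges.foldl pvStepB (PySem.List.pyRange 0 (N + 1) 1)) x =
        pvG (Edges.foldl pvStepB (PySem.List.pyRange 0 (N + 1) 1)) y ↔ pvConn Edges x y) := by
  have h0 : (((PySem.List.pyRange 0 (N + 1) 1).length : Int)) = N + 1 := by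
    rw [PySem.List.length_pyRange_one]; omega
  have hg0 : ∀ z, 0 ≤ z → z < N + 1 → pvG (PySem.List.pyRange 0 (N + 1) 1) z = z := by
    intro z hz hz'
    unfold pvG
    rw [PySem.List.pyGetD_eq_getElem _ _ hz (by omega)]
    rw [PySem.List.getElem_pyRange_one]
    omega
  have := pvCompInv N Edges [] (PySem.List.pyRange 0 (N + 1) 1) hE h0
    (fun x hx hx' => by rw [hg0 x hx hx']; exact Relation.ReflTransGen.refl)
    (fun x y hx hx' hy hy' => by rw [hg0 x hx hx', hg0 y hy hy', pvConn_nil])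
  intro x y hx hx' hy hy'
  have hfin := this.2.2 x y hx hx' hy hy'
  simpa using hfin

-- A's counting loop, tied directly to B's final labels f
theorem pvLoopA (adj : PySem.Dict Int (List Int)) (N : Int) (Edges : List (Int × Int))
    (f : Int → Int)
    (hadj : ∀ x y, y ∈ adj.getD x [] ↔ pvEdgeRel Edges x y)
    (hAdjB : ∀ x y, y ∈ adj.getD x [] → 0 ≤ y ∧ y < N + 1)
    (hf : ∀ x y, 0 ≤ x → x < N + 1 → 0 ≤ y → y < N + 1 → (f x = f y ↔ pvConn Edges x y)) :
    ∀ (t : Nat), (t : Int) ≤ N →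
      (∀ x, x ∈ ((PySem.List.pyRange 0 (t : Int) 1).foldl
          (fun (p : Int × PySem.Set Int) i => if i ∈ p.2 then p else (p.1 + 1, pvDfsFrom adj N p.2 i))
          ((0 : Int), PySem.Set.empty)).2 ↔ ∃ j : Int, 0 ≤ j ∧ j < (t : Int) ∧ pvConn Edges j x) ∧
      ((PySem.List.pyRange 0 (t : Int) 1).foldl
          (fun (p : Int × PySem.Set Int) i => if i ∈ p.2 then p else (p.1 + 1, pvDfsFrom adj N p.2 i))
          ((0 : Int), PySem.Set.empty)).1 =
        ((PySem.Set.ofList ((PySem.List.pyRange 0 (t : Int) 1).map f)).length : Int) := by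
  intro t
  induction t with
  | zero =>
    intro _
    rw [show ((0 : Nat) : Int) = 0 by rfl, PySem.List.pyRange_one_eq_nil (le_refl 0)]
    constructor
    · intro x
      simp [PySem.Set.empty]
      omega
    · simp [PySem.Set.ofList]
  | succ t ih =>
    intro hle
    have ht : (t : Int) ≤ N := by push_cast at hle ⊢; omega
    have htN : (t : Int) < N + 1 := by omega
    obtain ⟨ihmem, ihc⟩ := ih ht
    have hsplit : PySem.List.pyRange 0 ((t + 1 : Nat) : Int) 1 =
        PySem.List.pyRange 0 (t : Int) 1 ++ [(t : Int)] := by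
      push_cast
      exact PySem.List.pyRange_one_succ_right (by positivity)
    rw [hsplit, List.foldl_append, List.map_append, List.map_singleton, PySem.Set.ofList_append_singleton]
    set st := (PySem.List.pyRange 0 (t : Int) 1).foldl
      (fun (p : Int × PySem.Set Int) i => if i ∈ p.2 then p else (p.1 + 1, pvDfsFrom adj N p.2 i))
      ((0 : Int), PySem.Set.empty) with hst
    have hclosed : ∀ z ∈ st.2, ∀ y, pvEdgeRel Edges z y → y ∈ st.2 := by
      intro z hz y hzy
      obtain ⟨j, hj0, hj1, hconn⟩ := (ihmem z).1 hz
      exact (ihmem y).2 ⟨j, hj0, hj1, hconn.tail hzy⟩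
    by_cases hmem : (t : Int) ∈ st.2
    · -- already visited: counter and visit set unchanged
      simp only [List.foldl_cons, List.foldl_nil, if_pos hmem]
      obtain ⟨j, hj0, hj1, hconn⟩ := (ihmem (t : Int)).1 hmem
      have hfeq : f j = f (t : Int) :=
        (hf j (t : Int) hj0 (by omega) (by positivity) htN).2 hconn
      have hftmem : f (t : Int) ∈ PySem.Set.ofList ((PySem.List.pyRange 0 (t : Int) 1).map f) := by
        rw [PySem.Set.mem_ofList]
        exact List.mem_map.2 ⟨j, PySem.List.mem_pyRange_one.2 ⟨hj0, hj1⟩, hfeq⟩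
      rw [PySem.Set.add_of_mem hftmem]
      refine ⟨?_, ihc⟩
      intro x
      rw [ihmem x]
      constructor
      · rintro ⟨j', hj'0, hj'1, hc⟩
        exact ⟨j', hj'0, by push_cast; omega, hc⟩
      · rintro ⟨j', hj'0, hj'1, hc⟩
        by_cases hjt : j' < (t : Int)
        · exact ⟨j', hj'0, hjt, hc⟩
        · have : j' = (t : Int) := by push_cast at hj'1; omega
          subst this
          exact ⟨j, hj0, hj1, hconn.trans hc⟩
    · -- new component
      simp only [List.foldl_cons, List.foldl_nil, if_neg hmem]
      have hftnew : f (t : Int) ∉ PySem.Set.ofList ((PySem.List.pyRange 0 (t : Int) 1).map f) := by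
        rw [PySem.Set.mem_ofList]
        rintro hmm
        obtain ⟨j, hjr, hfeq⟩ := List.mem_map.1 hmm
        obtain ⟨hj0, hj1⟩ := PySem.List.mem_pyRange_one.1 hjr
        exact hmem ((ihmem (t : Int)).2
          ⟨j, hj0, hj1, (hf j (t : Int) hj0 (by omega) (by positivity) htN).1 hfeq⟩)
      rw [PySem.Set.add_of_not_mem hftnew]
      constructor
      · intro x
        have hdfs := pvDfsFrom_mem adj N Edges hadj hAdjB st.2 hclosed (t : Int)
          (by positivity) htN x
        simp only [hdfs]
        rw [ihmem x]
        constructor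
        · rintro (⟨j', hj'0, hj'1, hc⟩ | hc)
          · exact ⟨j', hj'0, by push_cast; omega, hc⟩
          · exact ⟨(t : Int), by positivity, by push_cast; omega, hc⟩
        · rintro ⟨j', hj'0, hj'1, hc⟩
          by_cases hjt : j' < (t : Int)
          · exact Or.inl ⟨j', hj'0, hjt, hc⟩
          · have : j' = (t : Int) := by push_cast at hj'1; omega
            subst this
            exact Or.inr hc
      · rw [List.length_append, ihc]
        push_cast
        simp [add_comm]


-- ===== VERDICT (by name: the statement is the Claim_ definition above) =====
theorem max_edges_to_remove_spec : Claim_equal_max_edges_to_remove := by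
  intro N M K Edges _ hPre
  unfold Spec_max_edges_to_remove
  by_cases hK : K > N
  · simp [max_edges_to_remove, max_edges_to_remove_alt, hK]
  · have hE : ∀ p ∈ Edges, 0 ≤ p.1 ∧ p.1 ≤ N ∧ 0 ≤ p.2 ∧ p.2 ≤ N := by
      rcases hPre with h | h
      · exact absurd h hK
      · exact h
    unfold max_edges_to_remove max_edges_to_remove_alt
    rw [if_neg hK, if_neg hK]
    dsimp only
    have hadj : ∀ x y, y ∈ (pvAdjBuild N Edges).getD x [] ↔ pvEdgeRel Edges x y :=
      pvAdjBuild_mem N Edges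
    have hAdjB : ∀ x y, y ∈ (pvAdjBuild N Edges).getD x [] → 0 ≤ y ∧ y < N + 1 := by
      intro x y hy
      have := pvEdgeRel_bound hE ((hadj x y).1 hy)
      exact ⟨this.1, by omega⟩
    by_cases hN : 0 ≤ N
    · have hfiff := pvCompFinal N Edges hN hE
      obtain ⟨-, hc⟩ := pvLoopA (pvAdjBuild N Edges) N Edges
        (fun i => PySem.List.pyGetD (Edges.foldl pvStepB (PySem.List.pyRange 0 (N + 1) 1)) i 0)
        hadj hAdjB (fun x y hx hx' hy hy' => hfiff x y hx hx' hy hy')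
        N.toNat (by omega)
      rw [Int.toNat_of_nonneg hN] at hc
      have hstepb : Edges.foldl pvStepB (PySem.List.pyRange 0 (N + 1) 1) =
          Edges.foldl (fun comp uv =>
            if PySem.List.pyGetD comp uv.1 0 ≠ PySem.List.pyGetD comp uv.2 0 then
              comp.map (fun x => if x = PySem.List.pyGetD comp uv.2 0 then
                PySem.List.pyGetD comp uv.1 0 else x)
            else comp) (PySem.List.pyRange 0 (N + 1) 1) := rfl
      rw [hstepb] at hc
      rw [hc]
      simp [PySem.Set.len]
    · have hnil : PySem.List.pyRange 0 N 1 = [] := PySem.List.pyRange_one_eq_nil (by omega)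
      rw [hnil]
      simp only [List.foldl_nil, List.map_nil]
      rfl
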